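-- pv_equiv track=rewrite | github.com/liuyishoua/robot_solution | utils.py | is_materials_2only1_rest
-- ===== SOURCE A (Python) =====
-- def have_material_type(num):
--     '''例如48 (110000) 表示拥有物品 4 和 5。
--     输入48, 返回数组 [4,5]
--     '''
--     # Convert the number to a binary string
--     binary_string = bin(num)[1:][::-1]
--     # Create a list of the non-zero indices using a list comprehension
--     have_material_type = [i for i, bit in enumerate(binary_string) if bit == '1']
--     return have_material_type
--
-- def find_materials_id(station_type, num):
--     '''输入的工作台类别只能是4,5,6,7,8,9, 这种收购类型的工作台
--     例如48 (110000) 表示拥有物品 4 和 5。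
--     根据工作台的类型, 返回工作台当前空缺的材料类别
--     如果是工作台 4, 只拥有 1 类别的物品, 那么工作台 4, 还有 2 类别的物品是空缺的
--     返回 list
--     '''
--     materials_list = have_material_type(num)
--     id_list = []
--     if station_type == 4:
--         if 1 not in materials_list:
--             id_list.append(1)
--         if 2 not in materials_list:
--             id_list.append(2)
--     elif station_type == 5:
--         if 1 not in materials_list:
--             id_list.append(1)
--         if 3 not in materials_list:
--             id_list.append(3)
--     elif station_type == 6:
--         if 2 not in materials_list:
--             id_list.append(2)
--         if 3 not in materials_list:
--             id_list.append(3)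
--     elif station_type == 7:
--         if 4 not in materials_list:
--             id_list.append(4)
--         if 5 not in materials_list:
--             id_list.append(5)
--         if 6 not in materials_list:
--             id_list.append(6)
--     elif station_type == 8:
--         id_list.append(7)
--     elif station_type == 9:
--         id_list = [1, 2, 3, 4, 5, 6, 7]
--
--     return id_list
--
-- def is_materials_2only1_rest(m_type, workstations):
--     res = 0
--     for station_id in range(len(workstations)):
--         type = workstations[station_id]['type']
--         if type in [4, 5, 6]:
--             rest_materials = find_materials_id(type, workstations[station_id]['m_state'])
--             if m_type in rest_materials and len(rest_materials) == 1:
--                 res = 1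
--     return res
-- ===== SOURCE B (Python) =====
-- REQ = {4: (1, 2), 5: (1, 3), 6: (2, 3)}
--
-- def is_materials_2only1_rest(m_type, workstations):
--     for station in workstations:
--         req = REQ.get(station['type'])
--         if req is not None:
--             a, b = req
--             if m_type == a or m_type == b:
--                 # bitmask of held materials; the bit decode is sign-insensitive
--                 s = abs(station['m_state'])
--                 other = a + b - m_type
--                 if (s >> m_type) & 1 == 0 and (s >> other) & 1 == 1:
--                     return 1
--     return 0
-- ===== Notes on version B (the rewrite author's own statement) =====
-- stated objective: simpler
-- what changed: Replaces the binary-string decode (bin/reverse/enumerate) and the if/elif missing-material list builder with a requirement table {4:(1,2),5:(1,3),6:(2,3)} and two direct bit tests on |m_state| (m_type's bit clear, the other required bit set), with early return instead of a result flag.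
import Mathlib
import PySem

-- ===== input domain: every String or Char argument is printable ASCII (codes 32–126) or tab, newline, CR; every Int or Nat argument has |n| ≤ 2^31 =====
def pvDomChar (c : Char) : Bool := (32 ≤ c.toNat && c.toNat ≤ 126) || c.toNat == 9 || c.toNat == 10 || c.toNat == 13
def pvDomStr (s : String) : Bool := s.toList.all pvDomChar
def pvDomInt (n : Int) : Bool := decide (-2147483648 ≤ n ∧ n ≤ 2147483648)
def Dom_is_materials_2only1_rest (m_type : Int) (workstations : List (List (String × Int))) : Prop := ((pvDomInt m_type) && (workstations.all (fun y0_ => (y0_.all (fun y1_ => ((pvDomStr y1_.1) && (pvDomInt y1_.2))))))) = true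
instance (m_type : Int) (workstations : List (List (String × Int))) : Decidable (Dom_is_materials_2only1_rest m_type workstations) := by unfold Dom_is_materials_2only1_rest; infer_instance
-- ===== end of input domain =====

-- B replaces A's binary-string decode and if/elif missing-material list builder with a
-- requirement table {4:(1,2),5:(1,3),6:(2,3)} and two direct bit tests on |m_state| (objective: simpler).


-- ===== PORT A =====
-- bin(num)[1:][::-1], then the indices of the '1' characters (enumerate + comprehension)
def have_material_type (num : Int) : List Int :=
  let binary_string : List Char := ((PySem.Int.toBinChars0b num).drop 1).reverse
  (PySem.List.enumerate binary_string).filterMap (fun p => if p.2 = '1' then some p.1 else none)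

def find_materials_id (station_type : Int) (num : Int) : List Int :=
  let materials_list := have_material_type num
  if station_type = 4 then
    (if (1 : Int) ∈ materials_list then ([] : List Int) else [1]) ++
      (if (2 : Int) ∈ materials_list then ([] : List Int) else [2])
  else if station_type = 5 then
    (if (1 : Int) ∈ materials_list then ([] : List Int) else [1]) ++
      (if (3 : Int) ∈ materials_list then ([] : List Int) else [3])
  else if station_type = 6 then
    (if (2 : Int) ∈ materials_list then ([] : List Int) else [2]) ++
      (if (3 : Int) ∈ materials_list then ([] : List Int) else [3])
  else if station_type = 7 then
    ((if (4 : Int) ∈ materials_list then ([] : List Int) else [4]) ++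
      (if (5 : Int) ∈ materials_list then ([] : List Int) else [5])) ++
      (if (6 : Int) ∈ materials_list then ([] : List Int) else [6])
  else if station_type = 8 then [7]
  else if station_type = 9 then [1, 2, 3, 4, 5, 6, 7]
  else []

def is_materials_2only1_rest (m_type : Int) (workstations : List (List (String × Int))) : Int :=
  workstations.foldl (fun res station =>
    let type := ((PySem.Dict.mk station).get? "type").getD 0
    if type = 4 ∨ type = 5 ∨ type = 6 then
      let rest_materials := find_materials_id type (((PySem.Dict.mk station).get? "m_state").getD 0)
      if m_type ∈ rest_materials ∧ rest_materials.length = 1 then 1 else res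
    else res) 0

-- ===== PORT B =====
-- REQ = {4: (1, 2), 5: (1, 3), 6: (2, 3)}
def pvREQ : PySem.Dict Int (Int × Int) := PySem.Dict.mk [(4, (1, 2)), (5, (1, 3)), (6, (2, 3))]

def is_materials_2only1_rest_alt (m_type : Int) (workstations : List (List (String × Int))) : Int :=
  match workstations with
  | [] => 0
  | station :: rest =>
    match pvREQ.get? (((PySem.Dict.mk station).get? "type").getD 0) with
    | some (a, b) =>
      if m_type = a ∨ m_type = b then
        -- s = abs(station['m_state']); Python's >> and & on this nonnegative value are Nat's >>> and &&&
        let s : Nat := (((PySem.Dict.mk station).get? "m_state").getD 0).natAbs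
        let other : Int := a + b - m_type
        if (s >>> m_type.toNat) &&& 1 = 0 ∧ (s >>> other.toNat) &&& 1 = 1 then 1
        else is_materials_2only1_rest_alt m_type rest
      else is_materials_2only1_rest_alt m_type rest
    | none => is_materials_2only1_rest_alt m_type rest

-- ===== PRECONDITION & SPEC =====
-- Pre_ excludes exactly the inputs on which Python A raises KeyError: a station without a 'type'
-- key, or a station of type 4, 5 or 6 without an 'm_state' key.
def Pre_is_materials_2only1_rest (m_type : Int) (workstations : List (List (String × Int))) : Prop :=
  ∀ station ∈ workstations,
    ((PySem.Dict.mk station).get? "type").isSome = true ∧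
      (((PySem.Dict.mk station).get? "type").getD 0 = 4 ∨
        ((PySem.Dict.mk station).get? "type").getD 0 = 5 ∨
        ((PySem.Dict.mk station).get? "type").getD 0 = 6 →
        ((PySem.Dict.mk station).get? "m_state").isSome = true)
instance (m_type : Int) (workstations : List (List (String × Int))) : Decidable (Pre_is_materials_2only1_rest m_type workstations) := by unfold Pre_is_materials_2only1_rest; infer_instance

def pvWitness_is_materials_2only1_rest : Int × (List (List (String × Int))) :=
  (1, [[("type", 4), ("m_state", 4)]])

def Spec_is_materials_2only1_rest (m_type : Int) (workstations : List (List (String × Int))) (out : Int) : Prop := out = is_materials_2only1_rest_alt m_type workstations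
instance (m_type : Int) (workstations : List (List (String × Int))) (out : Int) : Decidable (Spec_is_materials_2only1_rest m_type workstations out) := by unfold Spec_is_materials_2only1_rest; infer_instance

-- ===== CLAIM (what is proved, stated in full; the proofs are below) =====
def Claim_equal_is_materials_2only1_rest : Prop := ∀ (m_type : Int) (workstations : List (List (String × Int))), Dom_is_materials_2only1_rest m_type workstations → Pre_is_materials_2only1_rest m_type workstations → Spec_is_materials_2only1_rest m_type workstations (is_materials_2only1_rest m_type workstations)

-- ===== LEMMAS AND PROOFS =====

-- the little-endian binary digit list of a natural number
def pvBitsLE (n : Nat) : List Char :=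
  if h : n = 0 then [] else Nat.digitChar (n % 2) :: pvBitsLE (n / 2)
decreasing_by exact Nat.div_lt_self (Nat.pos_of_ne_zero h) (by norm_num)

lemma pvToDigitsCore_eq (n : Nat) : ∀ (fuel : Nat) (ds : List Char), 1 ≤ n → n ≤ fuel →
    Nat.toDigitsCore 2 fuel n ds = (pvBitsLE n).reverse ++ ds := by
  induction n using Nat.strong_induction_on with
  | _ n ih =>
    intro fuel ds h1 h2
    cases fuel with
    | zero => omega
    | succ f =>
      simp only [Nat.toDigitsCore]
      by_cases hz : n / 2 = 0
      · have hn1 : n = 1 := by omega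
        subst hn1
        rw [if_pos hz, pvBitsLE]
        norm_num
        rw [pvBitsLE]
        rfl
      · rw [if_neg hz, ih (n / 2) (by omega) f _ (by omega) (by omega)]
        conv_rhs => rw [pvBitsLE]
        rw [dif_neg (show ¬ n = 0 by omega)]
        simp [List.reverse_cons, List.append_assoc]

lemma pvToDigits_eq (n : Nat) (h : n ≠ 0) : Nat.toDigits 2 n = (pvBitsLE n).reverse := by
  rw [Nat.toDigits, pvToDigitsCore_eq n (n + 1) [] (by omega) (by omega), List.append_nil]

lemma pvBitsLE_getElem? (n k : Nat) : ((pvBitsLE n)[k]? = some '1') ↔ n.testBit k = true := by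
  induction n using Nat.strong_induction_on generalizing k with
  | _ n ih =>
    by_cases hz : n = 0
    · subst hz
      rw [pvBitsLE]
      simp
    · rw [pvBitsLE, dif_neg hz]
      cases k with
      | zero =>
        have h2 : n % 2 = 0 ∨ n % 2 = 1 := by omega
        rcases h2 with h2 | h2 <;>
          simp [h2, Nat.digitChar, Nat.testBit_zero]
      | succ k =>
        simp only [List.getElem?_cons_succ, Nat.testBit_add_one]
        exact ih (n / 2) (Nat.div_lt_self (by omega) (by norm_num)) k

lemma pvMem_select (cs : List Char) (s j : Int) :
    (j ∈ (PySem.List.enumerate cs s).filterMap (fun p => if p.2 = '1' then some p.1 else none)) ↔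
      ∃ k : Nat, j = s + k ∧ cs[k]? = some '1' := by
  induction cs generalizing s j with
  | nil => simp [PySem.List.enumerate_nil]
  | cons c cs ih =>
    rw [PySem.List.enumerate_cons, List.filterMap_cons]
    dsimp only
    by_cases hc : c = '1'
    · rw [if_pos hc]
      rw [List.mem_cons, ih]
      constructor
      · rintro (rfl | ⟨k, rfl, hg⟩)
        · exact ⟨0, by omega, by simp [hc]⟩
        · exact ⟨k + 1, by push_cast; ring, by simpa using hg⟩
      · rintro ⟨k, hk, hg⟩
        cases k with
        | zero => left; omega
        | succ k =>
          right
          exact ⟨k, by push_cast at hk ⊢; omega, by simpa using hg⟩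
    · rw [if_neg hc]
      rw [ih]
      constructor
      · rintro ⟨k, rfl, hg⟩
        exact ⟨k + 1, by push_cast; ring, by simpa using hg⟩
      · rintro ⟨k, hk, hg⟩
        cases k with
        | zero => simp only [List.getElem?_cons_zero, Option.some_inj] at hg; exact absurd hg hc
        | succ k => exact ⟨k, by push_cast at hk ⊢; omega, by simpa using hg⟩

lemma pvMem_hmt (m : Int) (k : Nat) :
    ((k : Int) ∈ have_material_type m) ↔ m.natAbs.testBit k = true := by
  unfold have_material_type
  rw [pvMem_select]
  have hsplit : ((PySem.Int.toBinChars0b m).drop 1).reverse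
      = (if m.natAbs = 0 then ['0'] else pvBitsLE m.natAbs) ++ (if m < 0 then ['b', '0'] else ['b']) := by
    unfold PySem.Int.toBinChars0b
    by_cases hm : m < 0
    · have hz : ¬ m.natAbs = 0 := by omega
      rw [if_pos hm, if_pos hm, if_neg hz]
      simp [pvToDigits_eq m.natAbs hz]
    · have hmn : m.toNat = m.natAbs := by omega
      rw [if_neg hm, if_neg hm, hmn]
      by_cases hz : m.natAbs = 0
      · rw [if_pos hz, hz]
        rfl
      · rw [if_neg hz]
        simp [pvToDigits_eq m.natAbs hz]
  rw [hsplit]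
  by_cases hz : m.natAbs = 0
  · rw [if_pos hz, hz]
    simp only [Nat.zero_testBit]
    constructor
    · rintro ⟨k', hk', hg⟩
      have h1 := List.mem_of_getElem? hg
      split at h1 <;> simp at h1
    · intro h; exact absurd h (by simp)
  · rw [if_neg hz]
    constructor
    · rintro ⟨k', hk', hg⟩
      have hkk : k' = k := by omega
      subst hkk
      by_cases hlt : k' < (pvBitsLE m.natAbs).length
      · rw [List.getElem?_append_left hlt] at hg
        exact (pvBitsLE_getElem? _ _).mp hg
      · rw [List.getElem?_append_right (by omega)] at hg
        have h1 := List.mem_of_getElem? hg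
        split at h1 <;> simp at h1
    · intro ht
      have hg := (pvBitsLE_getElem? m.natAbs k).mpr ht
      obtain ⟨hlt, -⟩ := List.getElem?_eq_some_iff.mp hg
      exact ⟨k, by omega, by rw [List.getElem?_append_left hlt]; exact hg⟩

lemma pvBit_one (n k : Nat) : ((n >>> k) &&& 1 = 1) ↔ n.testBit k = true := by
  rw [Nat.and_one_is_mod, Nat.shiftRight_eq_div_pow, Nat.testBit_eq_decide_div_mod_eq]
  simp

lemma pvBit_zero (n k : Nat) : ((n >>> k) &&& 1 = 0) ↔ n.testBit k = false := by
  rw [Nat.and_one_is_mod, Nat.shiftRight_eq_div_pow, Nat.testBit_eq_decide_div_mod_eq]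
  simp only [decide_eq_false_iff_not]
  omega

-- the per-station test, for a generic required pair (ka, kb)
lemma pvPair_cond (ka kb : Nat) (m_type m : Int) :
    (m_type ∈ ((if (ka : Int) ∈ have_material_type m then ([] : List Int) else [(ka : Int)]) ++
        (if (kb : Int) ∈ have_material_type m then ([] : List Int) else [(kb : Int)])) ∧
      ((if (ka : Int) ∈ have_material_type m then ([] : List Int) else [(ka : Int)]) ++
        (if (kb : Int) ∈ have_material_type m then ([] : List Int) else [(kb : Int)])).length = 1) ↔
    ((m_type = (ka : Int) ∨ m_type = (kb : Int)) ∧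
      ((m.natAbs >>> m_type.toNat) &&& 1 = 0 ∧
        (m.natAbs >>> ((ka : Int) + (kb : Int) - m_type).toNat) &&& 1 = 1)) := by
  have ea : ((ka : Int)).toNat = ka := by omega
  have eb : ((kb : Int)).toNat = kb := by omega
  have eab : (((ka : Int) + (kb : Int)) - (ka : Int)).toNat = kb := by omega
  have eba : (((ka : Int) + (kb : Int)) - (kb : Int)).toNat = ka := by omega
  cases ht1 : m.natAbs.testBit ka <;> cases ht2 : m.natAbs.testBit kb
  · -- both missing: the rest list has two elements
    have hn1 : ¬ ((ka : Int) ∈ have_material_type m) := by simp [pvMem_hmt, ht1]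
    have hn2 : ¬ ((kb : Int) ∈ have_material_type m) := by simp [pvMem_hmt, ht2]
    rw [if_neg hn1, if_neg hn2]
    constructor
    · rintro ⟨-, h⟩; exact absurd h (by simp)
    · rintro ⟨rfl | rfl, hb0, hb1⟩
      · rw [eab, pvBit_one, ht2] at hb1; simp at hb1
      · rw [eba, pvBit_one, ht1] at hb1; simp at hb1
  · -- ka missing, kb held: rest = [ka]
    have hn1 : ¬ ((ka : Int) ∈ have_material_type m) := by simp [pvMem_hmt, ht1]
    have hp2 : ((kb : Int) ∈ have_material_type m) := by simp [pvMem_hmt, ht2]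
    rw [if_neg hn1, if_pos hp2]
    constructor
    · rintro ⟨hm, -⟩
      simp only [List.append_nil, List.mem_singleton] at hm
      subst hm
      refine ⟨Or.inl rfl, ?_, ?_⟩
      · rw [ea, pvBit_zero]; exact ht1
      · rw [eab, pvBit_one]; exact ht2
    · rintro ⟨rfl | rfl, hb0, hb1⟩
      · exact ⟨by simp, by simp⟩
      · rw [eb, pvBit_zero, ht2] at hb0; simp at hb0
  · -- ka held, kb missing: rest = [kb]
    have hp1 : ((ka : Int) ∈ have_material_type m) := by simp [pvMem_hmt, ht1]
    have hn2 : ¬ ((kb : Int) ∈ have_material_type m) := by simp [pvMem_hmt, ht2]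
    rw [if_pos hp1, if_neg hn2]
    constructor
    · rintro ⟨hm, -⟩
      simp only [List.nil_append, List.mem_singleton] at hm
      subst hm
      refine ⟨Or.inr rfl, ?_, ?_⟩
      · rw [eb, pvBit_zero]; exact ht2
      · rw [eba, pvBit_one]; exact ht1
    · rintro ⟨rfl | rfl, hb0, hb1⟩
      · rw [ea, pvBit_zero, ht1] at hb0; simp at hb0
      · exact ⟨by simp, by simp⟩
  · -- both held: rest = []
    have hp1 : ((ka : Int) ∈ have_material_type m) := by simp [pvMem_hmt, ht1]
    have hp2 : ((kb : Int) ∈ have_material_type m) := by simp [pvMem_hmt, ht2]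
    rw [if_pos hp1, if_pos hp2]
    constructor
    · rintro ⟨h, -⟩; exact absurd h (by simp)
    · rintro ⟨rfl | rfl, hb0, hb1⟩
      · rw [ea, pvBit_zero, ht1] at hb0; simp at hb0
      · rw [eb, pvBit_zero, ht2] at hb0; simp at hb0

-- A's accumulator is monotone: once res = 1 the fold stays 1
lemma pvFoldl_one (m_type : Int) (l : List (List (String × Int))) :
    l.foldl (fun (res : Int) station =>
      if ((PySem.Dict.mk station).get? "type").getD 0 = 4 ∨
          ((PySem.Dict.mk station).get? "type").getD 0 = 5 ∨
          ((PySem.Dict.mk station).get? "type").getD 0 = 6 then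
        if m_type ∈ find_materials_id (((PySem.Dict.mk station).get? "type").getD 0)
              (((PySem.Dict.mk station).get? "m_state").getD 0) ∧
            (find_materials_id (((PySem.Dict.mk station).get? "type").getD 0)
              (((PySem.Dict.mk station).get? "m_state").getD 0)).length = 1 then 1
        else res
      else res) 1 = 1 := by
  induction l with
  | nil => rfl
  | cons st l ih =>
    rw [List.foldl_cons]
    split_ifs <;> exact ih

lemma pvA_cons (m_type : Int) (station : List (String × Int)) (rest : List (List (String × Int))) :
    is_materials_2only1_rest m_type (station :: rest) =
      (if ((PySem.Dict.mk station).get? "type").getD 0 = 4 ∨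
          ((PySem.Dict.mk station).get? "type").getD 0 = 5 ∨
          ((PySem.Dict.mk station).get? "type").getD 0 = 6 then
        if m_type ∈ find_materials_id (((PySem.Dict.mk station).get? "type").getD 0)
              (((PySem.Dict.mk station).get? "m_state").getD 0) ∧
            (find_materials_id (((PySem.Dict.mk station).get? "type").getD 0)
              (((PySem.Dict.mk station).get? "m_state").getD 0)).length = 1 then 1
        else is_materials_2only1_rest m_type rest
      else is_materials_2only1_rest m_type rest) := by
  unfold is_materials_2only1_rest
  rw [List.foldl_cons]
  dsimp only
  split_ifs
  · exact pvFoldl_one m_type rest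
  · rfl
  · rfl

lemma pvStepIf (p q : Prop) [Decidable p] [Decidable q] (x y : Int) :
    (if p ∧ q then x else y) = (if p then if q then x else y else y) := by
  split_ifs <;> tauto

lemma pvREQ_none (t : Int) (h4 : ¬ t = 4) (h5 : ¬ t = 5) (h6 : ¬ t = 6) :
    pvREQ.get? t = none := by
  unfold pvREQ
  rw [PySem.Dict.get?_mk_cons, PySem.Dict.get?_mk_cons, PySem.Dict.get?_mk_cons]
  simp only [beq_iff_eq]
  rw [if_neg (by omega), if_neg (by omega), if_neg (by omega)]
  rfl

lemma pvMain (m_type : Int) (ws : List (List (String × Int))) :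
    is_materials_2only1_rest m_type ws = is_materials_2only1_rest_alt m_type ws := by
  induction ws with
  | nil => rfl
  | cons station rest ih =>
    rw [pvA_cons]
    by_cases h4 : ((PySem.Dict.mk station).get? "type").getD 0 = 4
    · rw [h4]
      rw [if_pos (by norm_num)]
      rw [is_materials_2only1_rest_alt, h4]
      rw [show pvREQ.get? (4 : Int) = some (1, 2) by rfl]
      dsimp only
      have hc := pvPair_cond 1 2 m_type
        (((PySem.Dict.mk station).get? "m_state").getD 0)
      simp only [Nat.cast_one, Nat.cast_ofNat] at hc
      have hf : find_materials_id 4 (((PySem.Dict.mk station).get? "m_state").getD 0) =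
          (if (1 : Int) ∈ have_material_type (((PySem.Dict.mk station).get? "m_state").getD 0)
            then ([] : List Int) else [1]) ++
          (if (2 : Int) ∈ have_material_type (((PySem.Dict.mk station).get? "m_state").getD 0)
            then ([] : List Int) else [2]) := by
        unfold find_materials_id
        rw [if_pos rfl]
      rw [hf, if_congr hc rfl rfl, pvStepIf, ih]
    · by_cases h5 : ((PySem.Dict.mk station).get? "type").getD 0 = 5
      · rw [h5]
        rw [if_pos (by norm_num)]
        rw [is_materials_2only1_rest_alt, h5]
        rw [show pvREQ.get? (5 : Int) = some (1, 3) by rfl]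
        dsimp only
        have hc := pvPair_cond 1 3 m_type
          (((PySem.Dict.mk station).get? "m_state").getD 0)
        simp only [Nat.cast_one, Nat.cast_ofNat] at hc
        have hf : find_materials_id 5 (((PySem.Dict.mk station).get? "m_state").getD 0) =
            (if (1 : Int) ∈ have_material_type (((PySem.Dict.mk station).get? "m_state").getD 0)
              then ([] : List Int) else [1]) ++
            (if (3 : Int) ∈ have_material_type (((PySem.Dict.mk station).get? "m_state").getD 0)
              then ([] : List Int) else [3]) := by
          unfold find_materials_id
          rw [if_neg (by norm_num), if_pos rfl]
        rw [hf, if_congr hc rfl rfl, pvStepIf, ih]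
      · by_cases h6 : ((PySem.Dict.mk station).get? "type").getD 0 = 6
        · rw [h6]
          rw [if_pos (by norm_num)]
          rw [is_materials_2only1_rest_alt, h6]
          rw [show pvREQ.get? (6 : Int) = some (2, 3) by rfl]
          dsimp only
          have hc := pvPair_cond 2 3 m_type
            (((PySem.Dict.mk station).get? "m_state").getD 0)
          simp only [Nat.cast_ofNat] at hc
          have hf : find_materials_id 6 (((PySem.Dict.mk station).get? "m_state").getD 0) =
              (if (2 : Int) ∈ have_material_type (((PySem.Dict.mk station).get? "m_state").getD 0)
                then ([] : List Int) else [2]) ++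
              (if (3 : Int) ∈ have_material_type (((PySem.Dict.mk station).get? "m_state").getD 0)
                then ([] : List Int) else [3]) := by
            unfold find_materials_id
            rw [if_neg (by norm_num), if_neg (by norm_num), if_pos rfl]
          rw [hf, if_congr hc rfl rfl, pvStepIf, ih]
        · rw [if_neg (by tauto)]
          rw [is_materials_2only1_rest_alt]
          rw [pvREQ_none _ h4 h5 h6]
          exact ih

-- ===== VERDICT (by name: the statement is the Claim_ definition above) =====
theorem is_materials_2only1_rest_spec : Claim_equal_is_materials_2only1_rest := by
  intro m_type workstations _ _
  unfold Spec_is_materials_2only1_rest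
  exact pvMain m_type workstations
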